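-- pv_equiv track=rewrite | github.com/kdk0411/Coding_Test_Study | PyAlgo/Q8.두 점 사이의 거리.py | solution
-- ===== SOURCE A (Python) =====
-- def solution(data):
--   min = data[1] - data[0]
--   min_List = [data[0], data[1]]
--   for i in range(2, len(data)):
--     tmp = data[i] - data[i - 1]
--     if min > tmp:
--       del min_List[:]
--       min_List.append(data[i - 1])
--       min_List.append(data[i])
--       min = tmp
--   return min_List
-- ===== SOURCE B (Python) =====
-- def solution(data):
--     order = sorted(range(1, len(data)), key=lambda i: data[i] - data[i - 1])
--     idx = order[0]
--     return [data[idx - 1], data[idx]]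
-- ===== Notes on version B (the rewrite author's own statement) =====
-- stated objective: alternative
-- what changed: Replaces A's single fused scan (running minimum plus in-place rebuilt result list) with sorting all candidate indices by their consecutive difference (stable sort, so the first minimal index wins, matching A's strict-> tie-breaking) and reading the pair off the first element of the sorted order.
import Mathlib
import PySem

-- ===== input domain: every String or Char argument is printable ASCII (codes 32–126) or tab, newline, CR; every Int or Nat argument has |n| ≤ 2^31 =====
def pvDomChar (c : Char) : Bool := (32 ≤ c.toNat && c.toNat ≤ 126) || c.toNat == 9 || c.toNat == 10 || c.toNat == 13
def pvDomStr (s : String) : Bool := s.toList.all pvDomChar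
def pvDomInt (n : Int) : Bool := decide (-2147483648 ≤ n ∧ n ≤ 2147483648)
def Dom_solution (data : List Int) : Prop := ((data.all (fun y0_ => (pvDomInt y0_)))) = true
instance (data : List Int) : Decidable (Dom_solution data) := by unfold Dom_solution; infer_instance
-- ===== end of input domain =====

-- B sorts all candidate indices by their consecutive difference (stable) and takes the first,
-- instead of A's fused running-minimum scan (alternative algorithm, not faster).

-- ===== PORT A =====
def solution (data : List Int) : List Int :=
  -- literal port of A: running minimum `min` and result list `min_List`, loop over range(2, len(data))
  let m0 : Int := PySem.List.pyGetD data 1 0 - PySem.List.pyGetD data 0 0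
  let l0 : List Int := [PySem.List.pyGetD data 0 0, PySem.List.pyGetD data 1 0]
  let r := (PySem.List.pyRange 2 (data.length : Int) 1).foldl
    (fun (st : Int × List Int) i =>
      let tmp := PySem.List.pyGetD data i 0 - PySem.List.pyGetD data (i - 1) 0
      if st.1 > tmp then (tmp, [PySem.List.pyGetD data (i - 1) 0, PySem.List.pyGetD data i 0]) else st)
    (m0, l0)
  r.2

-- ===== PORT B =====
def solution_alt (data : List Int) : List Int :=
  -- literal port of Source B: stable sort of range(1, len(data)) keyed by the consecutive difference,
  -- then order[0]
  let order : List Int := PySem.List.sorted (PySem.List.pyRange 1 (data.length : Int) 1)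
    (fun i => PySem.List.pyGetD data i 0 - PySem.List.pyGetD data (i - 1) 0)
  match PySem.List.pyGet? order 0 with
  | some idx => [PySem.List.pyGetD data (idx - 1) 0, PySem.List.pyGetD data idx 0]
  | none => []  -- Python raises IndexError here (only when len(data) < 2); outside Pre_

-- ===== PRECONDITION & SPEC =====
-- Pre_ excludes exactly the inputs with fewer than 2 elements, on which both A and B raise IndexError.
def Pre_solution (data : List Int) : Prop := 2 ≤ data.length
instance (data : List Int) : Decidable (Pre_solution data) := by unfold Pre_solution; infer_instance
def pvWitness_solution : List Int := [7, 3, 4, 9]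
def Spec_solution (data : List Int) (out : List Int) : Prop := out = solution_alt data
instance (data : List Int) (out : List Int) : Decidable (Spec_solution data out) := by unfold Spec_solution; infer_instance

-- ===== CLAIM (what is proved, stated in full; the proofs are below) =====
def Claim_equal_solution : Prop := ∀ (data : List Int), Dom_solution data → Pre_solution data → Spec_solution data (solution data)

-- ===== LEMMAS AND PROOFS =====

-- the consecutive difference keyed at index i, shared by both ports
def pvKey (data : List Int) (i : Int) : Int :=
  PySem.List.pyGetD data i 0 - PySem.List.pyGetD data (i - 1) 0

-- head of a stable insertion is the running-minimum step
lemma pv_head_insertBy {α κ : Type} [LT κ] [DecidableLT κ] (key : α → κ) (x : α) (ys : List α) :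
    (PySem.List.insertBy (fun a b => decide (key a < key b)) x ys).head?
      = some (match ys with | [] => x | y :: _ => if key x < key y then x else y) := by
  cases ys with
  | nil => simp [PySem.List.insertBy]
  | cons y ys => by_cases h : key x < key y <;> simp [PySem.List.insertBy, h]

-- head of the insertion-sort fold is the running-minimum fold (stability: first min wins)
lemma pv_head_foldl_insertBy {α κ : Type} [LT κ] [DecidableLT κ] (key : α → κ) :
    ∀ (xs acc : List α),
      (xs.foldl (fun a x => PySem.List.insertBy (fun a b => decide (key a < key b)) x a) acc).head?
        = xs.foldl
            (fun a x => match a with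
              | none => some x
              | some m => if key x < key m then some x else some m)
            acc.head? := by
  intro xs
  induction xs with
  | nil => intro acc; rfl
  | cons x xs ih =>
    intro acc
    simp only [List.foldl_cons]
    rw [ih]
    congr 1
    rw [pv_head_insertBy]
    cases acc with
    | nil => rfl
    | cons y ys => by_cases h : key x < key y <;> simp [h]

-- head of sorted(xs, key) is min(xs, key) (Python's min: FIRST minimal element)
lemma pv_sorted_head_eq_min? {α κ : Type} [LT κ] [DecidableLT κ] (xs : List α) (key : α → κ) :
    (PySem.List.sorted xs key).head? = PySem.List.min? xs key := by
  rw [PySem.List.sorted_eq_foldl_insertBy]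
  rw [pv_head_foldl_insertBy]
  rfl

lemma pv_pyGet?_zero (l : List Int) : PySem.List.pyGet? l 0 = l.head? := by
  cases l <;> simp [PySem.List.pyGet?, PySem.List.pyIdx?]

-- invariant: A's fused fold over range(2, 2+t) and Python's min over range(1, 2+t)
-- track the same first-argmin index j
lemma pv_inv (data : List Int) (t : Nat) :
    ∃ j : Int, 1 ≤ j ∧ j < (2 + t : Int) ∧
      ((PySem.List.pyRange 2 (2 + t : Int) 1).foldl
        (fun (st : Int × List Int) i =>
          let tmp := PySem.List.pyGetD data i 0 - PySem.List.pyGetD data (i - 1) 0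
          if st.1 > tmp then (tmp, [PySem.List.pyGetD data (i - 1) 0, PySem.List.pyGetD data i 0]) else st)
        (PySem.List.pyGetD data 1 0 - PySem.List.pyGetD data 0 0,
         [PySem.List.pyGetD data 0 0, PySem.List.pyGetD data 1 0]))
        = (pvKey data j, [PySem.List.pyGetD data (j - 1) 0, PySem.List.pyGetD data j 0]) ∧
      (PySem.List.min? (PySem.List.pyRange 1 (2 + t : Int) 1) (pvKey data)) = some j := by
  induction t with
  | zero =>
    refine ⟨1, le_refl 1, by norm_num, ?_, ?_⟩
    · rw [PySem.List.pyRange_one_eq_nil (by norm_num)]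
      simp [pvKey]
    · have h12 : ((2 : Int) + ((0 : Nat) : Int)) = 1 + 1 := by norm_num
      rw [h12, PySem.List.pyRange_one_singleton]
      simp [PySem.List.min?]
  | succ t ih =>
    obtain ⟨j, hj1, hjlt, hA, hB⟩ := ih
    have e1 : ((2 : Int) + (t + 1 : Nat)) = (2 + t : Int) + 1 := by push_cast [Nat.cast_add]; ring
    have rA : PySem.List.pyRange 2 ((2 : Int) + (t + 1 : Nat)) 1
        = PySem.List.pyRange 2 (2 + t : Int) 1 ++ [(2 + t : Int)] := by
      rw [e1, PySem.List.pyRange_one_succ_right (by omega)]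
    have rB : PySem.List.pyRange 1 ((2 : Int) + (t + 1 : Nat)) 1
        = PySem.List.pyRange 1 (2 + t : Int) 1 ++ [(2 + t : Int)] := by
      rw [e1, PySem.List.pyRange_one_succ_right (by omega)]
    unfold PySem.List.min? at hB ⊢
    rw [rA, rB, List.foldl_append, List.foldl_append, hA, hB]
    simp only [List.foldl_cons, List.foldl_nil]
    by_cases hc : pvKey data (2 + t : Int) < pvKey data j
    · refine ⟨(2 + t : Int), by omega, by rw [e1]; omega, ?_, ?_⟩
      · have : pvKey data j > PySem.List.pyGetD data (2 + t : Int) 0 - PySem.List.pyGetD data ((2 + t : Int) - 1) 0 := by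
          simpa [pvKey] using hc
        simp only [this, if_pos]
        simp [pvKey]
      · simp [hc]
    · refine ⟨j, hj1, by rw [e1]; omega, ?_, ?_⟩
      · have : ¬ (pvKey data j > PySem.List.pyGetD data (2 + t : Int) 0 - PySem.List.pyGetD data ((2 + t : Int) - 1) 0) := by
          simp only [gt_iff_lt, not_lt]
          simpa [pvKey] using not_lt.mp hc
        simp [this]
      · simp [hc]

-- ===== VERDICT (by name: the statement is the Claim_ definition above) =====
theorem solution_spec : Claim_equal_solution := by
  intro data _hdom hpre
  unfold Spec_solution solution solution_alt
  have h2 : 2 ≤ data.length := hpre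
  obtain ⟨t, ht⟩ : ∃ t : Nat, data.length = 2 + t := ⟨data.length - 2, by omega⟩
  have hcast : (data.length : Int) = (2 + t : Int) := by rw [ht]; push_cast; ring
  obtain ⟨j, hj1, hjlt, hA, hB⟩ := pv_inv data t
  have hBkey : PySem.List.min? (PySem.List.pyRange 1 (2 + t : Int) 1)
      (fun i => PySem.List.pyGetD data i 0 - PySem.List.pyGetD data (i - 1) 0) = some j := by
    simpa [pvKey] using hB
  rw [hcast]
  simp only [hA, pv_sorted_head_eq_min?, pv_pyGet?_zero, hBkey]
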